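-- pv_equiv track=rewrite | github.com/Georgycas/CE450-HW | CE450HW/Week 2/2.10.py | bnc_bck_frth
-- ===== SOURCE A (Python) =====
-- def bnc_bck_frth(k):
--     A = []
--     B = 1
--     trace = 1
--     for I in range(1, 101):
--         if I % 7 == 0 or '7' in str(I):
--             trace = trace * -1
--         if trace == 1:
--             A.append(B)
--             B += 1
--         else:
--             A.append(B)
--             B -= 1
--     return A[k - 1]
-- ===== SOURCE B (Python) =====
-- def bnc_bck_frth(k):
--     # Pass 1: the 100 step directions (trace after its possible flip at each I).
--     dirs = []
--     trace = 1
--     for I in range(1, 101):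
--         if I % 7 == 0 or '7' in str(I):
--             trace = -trace
--         dirs.append(trace)
--     # Pass 2: cumulative sum starting at 1 (value is recorded before each step).
--     vals = [1]
--     for d in dirs[:-1]:
--         vals.append(vals[-1] + d)
--     return vals[k - 1]
-- ===== Notes on version B (the rewrite author's own statement) =====
-- stated objective: alternative
-- what changed: A interleaves direction flipping and value recording in one fused loop; B separates concerns: one pass builds the per-step direction sequence, then the value list is a cumulative sum over all directions but the last.
import Mathlib
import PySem

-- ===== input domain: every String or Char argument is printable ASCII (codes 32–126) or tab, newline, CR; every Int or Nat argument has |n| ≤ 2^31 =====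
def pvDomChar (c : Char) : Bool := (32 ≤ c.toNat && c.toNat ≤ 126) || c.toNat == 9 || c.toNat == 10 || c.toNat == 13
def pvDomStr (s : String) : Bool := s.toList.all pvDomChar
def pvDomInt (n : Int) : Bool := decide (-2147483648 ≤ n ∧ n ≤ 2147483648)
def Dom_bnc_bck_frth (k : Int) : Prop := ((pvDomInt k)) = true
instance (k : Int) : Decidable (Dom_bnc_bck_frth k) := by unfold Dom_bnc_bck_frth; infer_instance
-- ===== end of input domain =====

-- B: same bouncing sequence built in a different decomposition — one pass collecting the
-- step directions, then a cumulative sum over them — instead of A's single fused loop.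


-- ===== PORT A =====
-- A's loop: state (A, B, trace); B is appended before it is stepped.
def bnc_bck_frth_loop : List Int × Int × Int :=
  (PySem.List.pyRange 1 101 1).foldl
    (fun (st : List Int × Int × Int) I =>
      let trace := if PySem.Int.mod I 7 == 0 || PySem.Str.isIn "7" (PySem.Int.toStr I)
        then st.2.2 * -1 else st.2.2
      if trace == 1 then (st.1 ++ [st.2.1], st.2.1 + 1, trace)
      else (st.1 ++ [st.2.1], st.2.1 - 1, trace))
    ([], 1, 1)

def bnc_bck_frth (k : Int) : Int :=
  (PySem.List.pyGet? bnc_bck_frth_loop.1 (k - 1)).getD 0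

-- ===== PORT B =====
-- B pass 1: the per-step directions.
def bnc_alt_dirs : List Int :=
  ((PySem.List.pyRange 1 101 1).foldl
    (fun (st : List Int × Int) I =>
      let trace := if PySem.Int.mod I 7 == 0 || PySem.Str.isIn "7" (PySem.Int.toStr I)
        then -st.2 else st.2
      (st.1 ++ [trace], trace))
    ([], 1)).1

-- B pass 2: cumulative sum over dirs[:-1].
def bnc_alt_vals : List Int :=
  (PySem.List.slice bnc_alt_dirs none (some (-1))).foldl
    (fun vals d => vals ++ [(PySem.List.pyGet? vals (-1)).getD 0 + d]) [1]

def bnc_bck_frth_alt (k : Int) : Int :=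
  (PySem.List.pyGet? bnc_alt_vals (k - 1)).getD 0

-- ===== PRECONDITION & SPEC =====
-- Pre_ excludes exactly the inputs where A raises IndexError (index k-1 out of range of the fixed-length list).
def Pre_bnc_bck_frth (k : Int) : Prop := -99 ≤ k ∧ k ≤ 100
instance (k : Int) : Decidable (Pre_bnc_bck_frth k) := by unfold Pre_bnc_bck_frth; infer_instance
def pvWitness_bnc_bck_frth : Int := (5)

def Spec_bnc_bck_frth (k : Int) (out : Int) : Prop := out = bnc_bck_frth_alt k
instance (k : Int) (out : Int) : Decidable (Spec_bnc_bck_frth k out) := by unfold Spec_bnc_bck_frth; infer_instance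

-- ===== CLAIM (what is proved, stated in full; the proofs are below) =====
def Claim_equal_bnc_bck_frth : Prop := ∀ (k : Int), Dom_bnc_bck_frth k → Pre_bnc_bck_frth k → Spec_bnc_bck_frth k (bnc_bck_frth k)

-- ===== LEMMAS AND PROOFS =====
-- The two concretely computed lists coincide.
set_option maxRecDepth 10000 in
theorem bnc_lists_eq : bnc_bck_frth_loop.1 = bnc_alt_vals := by decide

-- ===== VERDICT (by name: the statement is the Claim_ definition above) =====
theorem bnc_bck_frth_spec : Claim_equal_bnc_bck_frth := by
  intro k _ _
  unfold Spec_bnc_bck_frth bnc_bck_frth bnc_bck_frth_alt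
  rw [bnc_lists_eq]
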